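-- pv_equiv track=rewrite | github.com/ZackBarry/Advent_of_Code | 2022/06-turning-trouble.py | end_index_n_unique
-- ===== SOURCE A (Python) =====
-- def end_index_n_unique(word, n):
--     last_n = []
--     for i in range(len(word)):
--         last_n.append(word[i])
--         if len(last_n) > n:
--             del last_n[0]
--         if len(set(last_n)) == n:
--             return i
--     return -1
-- ===== SOURCE B (Python) =====
-- def end_index_n_unique(word, n):
--     counts = {}
--     distinct = 0
--     size = 0
--     for i, ch in enumerate(word):
--         counts[ch] = counts.get(ch, 0) + 1
--         if counts[ch] == 1:
--             distinct += 1
--         size += 1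
--         if size > n:
--             old = word[i - size + 1]
--             counts[old] = counts[old] - 1
--             if counts[old] == 0:
--                 distinct -= 1
--             size -= 1
--         if distinct == n:
--             return i
--     return -1
-- ===== Notes on version B (the rewrite author's own statement) =====
-- stated objective: faster
-- what changed: Replaced rebuilding a Python set of the whole trailing window at every index with an incremental sliding window: a char-count dict and a running distinct counter updated in O(1) per step.
import Mathlib
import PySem

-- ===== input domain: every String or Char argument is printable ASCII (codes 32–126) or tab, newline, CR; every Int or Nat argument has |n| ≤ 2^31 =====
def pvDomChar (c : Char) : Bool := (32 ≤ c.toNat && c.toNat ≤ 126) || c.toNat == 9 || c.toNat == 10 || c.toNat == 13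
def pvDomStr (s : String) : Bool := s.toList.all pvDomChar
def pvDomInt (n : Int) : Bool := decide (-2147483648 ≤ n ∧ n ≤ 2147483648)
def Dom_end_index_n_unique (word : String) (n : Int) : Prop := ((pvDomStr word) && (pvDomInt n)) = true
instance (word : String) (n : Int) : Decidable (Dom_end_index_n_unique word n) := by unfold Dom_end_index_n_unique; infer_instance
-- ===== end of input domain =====

-- B replaces A's per-index set-of-the-window rebuild with an O(1)-per-step sliding window
-- (char-count dict + running distinct counter); objective: faster (asymptotic, O(len*n) -> O(len)).

-- ===== PORT A =====
-- A: keep list last_n of the trailing <= n chars; at each i append word[i], trim front,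
-- return i when len(set(last_n)) == n.
def pvAGo (n : Int) : List Char → Int → List Char → Int
  | [], _, _ => -1
  | c :: rest, i, last_n =>
    let l1 := last_n ++ [c]
    let l2 := if (l1.length : Int) > n then l1.drop 1 else l1
    if ((PySem.Set.ofList l2).length : Int) = n then i else pvAGo n rest (i + 1) l2

def end_index_n_unique (word : String) (n : Int) : Int :=
  pvAGo n word.toList 0 []

-- ===== PORT B =====
-- B: counts = dict char -> occurrences in the current window, distinct = running number of
-- distinct chars in the window, size = window length; one O(1) update per index.
-- The lookup word[i - size + 1] is always in range when started from the entry state,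
-- so pyGetD's default is never used.
def pvBGo (chars : List Char) (n : Int) :
    List Char → Int → PySem.Dict Char Int → Int → Int → Int
  | [], _, _, _, _ => -1
  | c :: rest, i, counts, distinct, size =>
    let counts1 := counts.insert c (counts.getD c 0 + 1)
    let distinct1 := if counts1.getD c 0 = 1 then distinct + 1 else distinct
    let size1 := size + 1
    let st :=
      if size1 > n then
        let old := PySem.List.pyGetD chars (i - size1 + 1) c
        let counts2 := counts1.insert old (counts1.getD old 0 - 1)
        let distinct2 := if counts2.getD old 0 = 0 then distinct1 - 1 else distinct1
        (counts2, distinct2, size1 - 1)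
      else (counts1, distinct1, size1)
    if st.2.1 = n then i else pvBGo chars n rest (i + 1) st.1 st.2.1 st.2.2

def end_index_n_unique_alt (word : String) (n : Int) : Int :=
  pvBGo word.toList n word.toList 0 PySem.Dict.empty 0 0

-- ===== PRECONDITION & SPEC =====
def Spec_end_index_n_unique (word : String) (n : Int) (out : Int) : Prop := out = end_index_n_unique_alt word n
instance (word : String) (n : Int) (out : Int) : Decidable (Spec_end_index_n_unique word n out) := by unfold Spec_end_index_n_unique; infer_instance

-- ===== CLAIM (what is proved, stated in full; the proofs are below) =====
def Claim_equal_end_index_n_unique : Prop := ∀ (word : String) (n : Int), Dom_end_index_n_unique word n → Spec_end_index_n_unique word n (end_index_n_unique word n)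

-- ===== LEMMAS AND PROOFS =====

-- number of distinct elements of a list, as the length of its Python set
lemma ofList_length_toFinset (l : List Char) :
    (PySem.Set.ofList l).length = l.toFinset.card := by
  induction l using List.reverseRecOn with
  | nil => simp [PySem.Set.ofList]
  | append_singleton xs x ih =>
    rw [PySem.Set.ofList_append_singleton, PySem.Set.add_eq_ite]
    by_cases hx : x ∈ xs
    · simp [hx, PySem.Set.mem_ofList, ih, List.toFinset_append,
        Finset.insert_eq_self.mpr (List.mem_toFinset.mpr hx)]
    · rw [if_neg (by simp [PySem.Set.mem_ofList, hx])]
      simp only [List.length_append, List.length_cons, List.length_nil, ih,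
        List.toFinset_append, List.toFinset_cons, List.toFinset_nil]
      have : xs.toFinset ∪ insert x ∅ = insert x xs.toFinset := by
        ext y; simp
      rw [this, Finset.card_insert_of_notMem (by simp [hx])]
    

-- head element of the second block of an append, by position
lemma getD_append_length {A : Type} (l1 l2 : List A) (d : A) :
    (l1 ++ l2).getD l1.length d = l2.getD 0 d := by
  induction l1 with
  | nil => rfl
  | cons a l1 ih => simpa using ih

-- appending a char to the window adds 1 to its distinct count iff the char is new
lemma distinct_snoc (w : List Char) (c : Char) :
    (PySem.Set.ofList (w ++ [c])).length
      = (PySem.Set.ofList w).length + (if c ∈ w then 0 else 1) := by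
  rw [PySem.Set.ofList_append_singleton, PySem.Set.add_eq_ite]
  by_cases hc : c ∈ w <;> simp [hc, PySem.Set.mem_ofList]

-- dropping the head of the window removes 1 from its distinct count iff the head does not recur
lemma distinct_cons (x : Char) (t : List Char) :
    (PySem.Set.ofList (x :: t)).length
      = (PySem.Set.ofList t).length + (if x ∈ t then 0 else 1) := by
  rw [ofList_length_toFinset, ofList_length_toFinset]
  by_cases hx : x ∈ t
  · simp [List.toFinset_cons, Finset.insert_eq_self.mpr (List.mem_toFinset.mpr hx), hx]
  · simp [List.toFinset_cons, Finset.card_insert_of_notMem (fun hmem => hx (List.mem_toFinset.mp hmem)), hx]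

-- main loop invariant lemma
lemma go_eq (n : Int) (rest : List Char) (pre w : List Char)
    (counts : PySem.Dict Char Int) (distinct size : Int)
    (hsuf : w <:+ pre)
    (hcnt : ∀ ch, counts.getD ch 0 = (w.count ch : Int))
    (hdis : distinct = ((PySem.Set.ofList w).length : Int))
    (hsize : size = (w.length : Int)) :
    pvBGo (pre ++ rest) n rest (pre.length : Int) counts distinct size
      = pvAGo n rest (pre.length : Int) w := by
  induction rest generalizing pre w counts distinct size with
  | nil => simp [pvBGo, pvAGo]
  | cons c rest ih =>
    obtain ⟨front, hfront⟩ := hsuf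
    simp only [pvBGo, pvAGo]
    -- B's counts after the increment equal the counts of the window w ++ [c]
    have hcnt1 : ∀ ch, (counts.insert c (counts.getD c 0 + 1)).getD ch 0
        = (((w ++ [c]).count ch : Nat) : Int) := by
      intro ch
      rw [PySem.Dict.getD_insert]
      by_cases h : ch = c
      · subst h; rw [if_pos rfl, hcnt]
        simp [List.count_append]
      · rw [if_neg h, hcnt]
        simp [List.count_append, List.count_eq_zero.mpr (fun hm => h (List.mem_singleton.mp hm))]
    -- B's distinct after the increment counts the distinct chars of w ++ [c]
    have hdis1 : (if (counts.insert c (counts.getD c 0 + 1)).getD c 0 = 1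
          then distinct + 1 else distinct)
        = ((PySem.Set.ofList (w ++ [c])).length : Int) := by
      rw [hcnt1 c, hdis, distinct_snoc]
      have hcc : List.count c (w ++ [c]) = List.count c w + 1 := by
        simp [List.count_append]
      rw [hcc]
      by_cases hm : c ∈ w
      · rw [if_neg (by have := List.count_pos_iff.mpr hm; omega), if_pos hm]
        push_cast; ring
      · rw [if_pos (by rw [List.count_eq_zero.mpr hm]; norm_num), if_neg hm]; push_cast; ring
    have hbeq : size + 1 = ((w ++ [c]).length : Int) := by rw [hsize]; simp
    by_cases hbr : ((w ++ [c]).length : Int) > n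
    · -- removal branch on both sides
      rw [if_pos (show size + 1 > n by rw [hbeq]; exact hbr), if_pos hbr]
      dsimp only
      -- the window w ++ [c] is nonempty: name its head and tail
      obtain ⟨old, t, hot⟩ : ∃ old t, w ++ [c] = old :: t := by
        cases w with
        | nil => exact ⟨c, [], rfl⟩
        | cons a w' => exact ⟨a, w' ++ [c], rfl⟩
      -- the char B removes is the head of the window
      have hidx : (pre.length : Int) - (size + 1) + 1 = (front.length : Nat) := by
        rw [hsize, ← hfront]; push_cast [List.length_append]; ring
      have hold : PySem.List.pyGetD (pre ++ c :: rest) ((pre.length : Int) - (size + 1) + 1) c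
          = old := by
        rw [hidx, PySem.List.pyGetD_natCast, ← hfront]
        have hw : w ++ c :: rest = old :: (t ++ rest) := by
          have : w ++ c :: rest = (w ++ [c]) ++ rest := by simp
          rw [this, hot]; rfl
        rw [List.append_assoc, hw, getD_append_length]
        rfl
      rw [hold]
      -- counts after the decrement equal the counts of the shrunk window t
      have hcnt2 : ∀ ch,
          ((counts.insert c (counts.getD c 0 + 1)).insert old
            ((counts.insert c (counts.getD c 0 + 1)).getD old 0 - 1)).getD ch 0
          = ((t.count ch : Nat) : Int) := by
        intro ch
        rw [PySem.Dict.getD_insert]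
        by_cases h : ch = old
        · subst h; rw [if_pos rfl, hcnt1, hot]
          rw [List.count_cons_self]; push_cast; ring
        · rw [if_neg h, hcnt1, hot]
          have h' : ¬ old = ch := fun e => h e.symm
          simp [List.count_cons, if_neg h']
      -- distinct after the decrement counts the distinct chars of t
      have hdis2 : (if ((counts.insert c (counts.getD c 0 + 1)).insert old
              ((counts.insert c (counts.getD c 0 + 1)).getD old 0 - 1)).getD old 0 = 0
            then (if (counts.insert c (counts.getD c 0 + 1)).getD c 0 = 1
              then distinct + 1 else distinct) - 1
            else (if (counts.insert c (counts.getD c 0 + 1)).getD c 0 = 1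
              then distinct + 1 else distinct))
          = ((PySem.Set.ofList t).length : Int) := by
        rw [hcnt2 old, hdis1, hot, distinct_cons]
        by_cases hm : old ∈ t
        · rw [if_neg (by have := List.count_pos_iff.mpr hm; omega), if_pos hm]
          push_cast; ring
        · rw [if_pos (by rw [List.count_eq_zero.mpr hm]; simp), if_neg hm]; push_cast; ring
      have hdrop : (w ++ [c]).drop 1 = t := by rw [hot]; simp
      rw [hdis2, hdrop]
      by_cases hfin : ((PySem.Set.ofList t).length : Int) = n
      · rw [if_pos hfin, if_pos hfin]
      · rw [if_neg hfin, if_neg hfin]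
        have hre : pre ++ c :: rest = (pre ++ [c]) ++ rest := by simp
        have hlen : (pre.length : Int) + 1 = ((pre ++ [c]).length : Nat) := by simp
        rw [hre, hlen]
        apply ih
        · have hkey : front ++ (w ++ [c]) = pre ++ [c] := by
            rw [← List.append_assoc, hfront]
          exact ⟨front ++ [old],
            by rw [List.append_assoc, List.singleton_append, ← hot, hkey]⟩
        · exact hcnt2
        · rfl
        · have : w.length + 1 = t.length + 1 := by
            have := congrArg List.length hot; simpa using this
          rw [hsize]; omega
    · -- no removal: the window grows to w ++ [c]
      rw [if_neg (show ¬ size + 1 > n by rw [hbeq]; exact hbr), if_neg hbr]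
      dsimp only
      rw [hdis1]
      by_cases hfin : ((PySem.Set.ofList (w ++ [c])).length : Int) = n
      · rw [if_pos hfin, if_pos hfin]
      · rw [if_neg hfin, if_neg hfin]
        have hre : pre ++ c :: rest = (pre ++ [c]) ++ rest := by simp
        have hlen : (pre.length : Int) + 1 = ((pre ++ [c]).length : Nat) := by simp
        rw [hre, hlen]
        apply ih
        · exact ⟨front, by rw [← List.append_assoc, hfront]⟩
        · exact hcnt1
        · rfl
        · rw [hsize]; simp

-- ===== VERDICT (by name: the statement is the Claim_ definition above) =====
theorem end_index_n_unique_spec : Claim_equal_end_index_n_unique := by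
  intro word n _
  unfold Spec_end_index_n_unique end_index_n_unique end_index_n_unique_alt
  have h := go_eq n word.toList [] [] PySem.Dict.empty 0 0
    List.nil_suffix (fun ch => rfl) rfl rfl
  simpa using h.symm
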